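-- pv_equiv track=rewrite | github.com/cucapra/pollen | pollen_data_gen/pollen_data_gen/simple.py | number_list_to_path_seq
-- ===== SOURCE A (Python) =====
-- from typing import Dict, Union, Optional, Any, List, Sequence, TextIO
--
-- def number_list_to_path_seq(numbers: List[int]) -> str:
--     """The inverse of the above function."""
--     ans = []
--     for i, number in enumerate(numbers):
--         if i % 2:
--             if number == 0:
--                 ans.append("+,")
--             elif number == 1:
--                 ans.append("-,")
--         else:
--             ans.append(str(number))
--
--     # Need to drop the last comma.
--     return "".join(ans)[:-1]
-- ===== SOURCE B (Python) =====
-- def number_list_to_path_seq(numbers):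
--     """The inverse of the above function."""
--     # Staged construction over strided slices: the node ids sit at even
--     # indices and the orientation codes at odd indices, so slice them apart,
--     # render each column separately, pad the (possibly shorter) sign column,
--     # and re-interleave.  The final [:-1] drops the trailing comma as in A.
--     table = {0: "+,", 1: "-,"}
--     nodes = [str(n) for n in numbers[0::2]]
--     signs = [table.get(o, "") for o in numbers[1::2]]
--     signs += [""] * (len(nodes) - len(signs))
--     pieces = [p for pair in zip(nodes, signs) for p in pair]
--     return "".join(pieces)[:-1]
-- ===== Notes on version B (the rewrite author's own statement) =====
-- stated objective: alternative
-- what changed: Replaces A's single enumerate-with-parity-test pass by staged passes: slice the even-index nodes and odd-index orientation codes into two columns, render each column independently (a lookup table for the signs), pad the sign column, and re-interleave the columns before joining.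
import Mathlib
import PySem

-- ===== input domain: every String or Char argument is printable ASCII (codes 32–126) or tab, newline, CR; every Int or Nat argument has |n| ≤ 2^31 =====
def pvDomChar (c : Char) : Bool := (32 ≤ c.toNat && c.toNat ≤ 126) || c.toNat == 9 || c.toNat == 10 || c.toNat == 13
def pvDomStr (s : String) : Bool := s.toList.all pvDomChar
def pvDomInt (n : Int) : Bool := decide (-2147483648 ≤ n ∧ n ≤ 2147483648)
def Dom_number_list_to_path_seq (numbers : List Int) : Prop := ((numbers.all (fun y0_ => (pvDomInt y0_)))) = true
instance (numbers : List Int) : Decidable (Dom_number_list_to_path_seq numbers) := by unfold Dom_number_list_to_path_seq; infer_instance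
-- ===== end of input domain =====

-- B replaces A's enumerate-with-parity-test pass by staged passes over the two strided columns (nodes at even indices, orientation codes at odd), rendered separately and re-interleaved (alternative decomposition, same cost).


-- ===== PORT A =====
-- literal port: enumerate, parity test on the index, join, drop last char via s[:-1]
def number_list_to_path_seq (numbers : List Int) : String :=
  let ans : List String :=
    (PySem.List.enumerate numbers).foldl
      (fun ans p =>
        if PySem.Int.mod p.1 2 ≠ 0 then
          if p.2 = 0 then ans ++ ["+,"]
          else if p.2 = 1 then ans ++ ["-,"]
          else ans
        else ans ++ [PySem.Int.toStr p.2])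
      []
  PySem.Str.slice (PySem.Str.join "" ans) none (some (-1))

-- ===== PORT B =====
-- hand port of the stride-2 slice xs[0::2] (PySem.List.slice has no step);
-- exact: takes every second element starting at index 0.
def strideEvens : List Int → List Int
  | [] => []
  | [x] => [x]
  | x :: _ :: r => x :: strideEvens r

-- Source B: slice the node and sign columns apart, render both, pad the sign
-- column and re-interleave (numbers[1::2] is the even-stride of the tail).
def number_list_to_path_seq_alt (numbers : List Int) : String :=
  let table : PySem.Dict Int String := PySem.Dict.ofList [(0, "+,"), (1, "-,")]
  let nodes := (strideEvens numbers).map PySem.Int.toStr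
  let signs := (strideEvens numbers.tail).map (fun o => PySem.Dict.getD table o "")
  let signsPad := signs ++ List.replicate (nodes.length - signs.length) ""
  PySem.Str.slice (PySem.Str.join "" ((nodes.zip signsPad).flatMap (fun p => [p.1, p.2]))) none (some (-1))

-- ===== PRECONDITION & SPEC =====
def Spec_number_list_to_path_seq (numbers : List Int) (out : String) : Prop := out = number_list_to_path_seq_alt numbers
instance (numbers : List Int) (out : String) : Decidable (Spec_number_list_to_path_seq numbers out) := by unfold Spec_number_list_to_path_seq; infer_instance

-- ===== CLAIM (what is proved, stated in full; the proofs are below) =====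
def Claim_equal_number_list_to_path_seq : Prop := ∀ (numbers : List Int), Dom_number_list_to_path_seq numbers → Spec_number_list_to_path_seq numbers (number_list_to_path_seq numbers)

-- ===== LEMMAS AND PROOFS =====

-- proof-side bridge: the pieces A's loop appends, two at a time
def altGo : List Int → List String
  | [] => []
  | [n] => [PySem.Int.toStr n]
  | n :: o :: rest =>
      [PySem.Int.toStr n] ++
        (if o = 0 then ["+,"] else if o = 1 then ["-,"] else []) ++ altGo rest

-- A's loop from an even start index builds exactly the pair-wise pieces.
theorem loopA_eq_altGo (numbers : List Int) :
    ∀ (s : Int) (acc : List String), PySem.Int.mod s 2 = 0 →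
      (PySem.List.enumerate numbers s).foldl
        (fun ans p =>
          if PySem.Int.mod p.1 2 ≠ 0 then
            if p.2 = 0 then ans ++ ["+,"]
            else if p.2 = 1 then ans ++ ["-,"]
            else ans
          else ans ++ [PySem.Int.toStr p.2])
        acc = acc ++ altGo numbers := by
  induction numbers using altGo.induct with
  | case1 =>
      intro s acc _
      simp [altGo, PySem.List.enumerate]
  | case2 n =>
      intro s acc hs
      rw [PySem.Int.mod_eq_emod_of_pos (by norm_num : (0:Int) < 2)] at hs
      simp [altGo, PySem.List.enumerate]
      intro h; omega
  | case3 n o rest ih =>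
      intro s acc hs
      have h2 : (0:Int) < 2 := by norm_num
      rw [PySem.Int.mod_eq_emod_of_pos h2] at hs
      have hs1 : PySem.Int.mod (s + 1) 2 ≠ 0 := by
        rw [PySem.Int.mod_eq_emod_of_pos h2]; omega
      have hs2 : PySem.Int.mod (s + 1 + 1) 2 = 0 := by
        rw [PySem.Int.mod_eq_emod_of_pos h2]; omega
      have hs0 : PySem.Int.mod s 2 = 0 := by
        rw [PySem.Int.mod_eq_emod_of_pos h2]; exact hs
      simp only [PySem.List.enumerate_cons, List.foldl_cons,
        if_neg (not_not_intro hs0), if_pos hs1]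
      rw [ih (s + 1 + 1) _ hs2]
      by_cases h0 : o = 0
      · simp [altGo, h0]
      · by_cases h1 : o = 1
        · simp [altGo, h1]
        · simp [altGo, h0, h1]

-- joining with the empty separator is concatenation
theorem join_nil_eq_flatten (ps : List (List Char)) : PySem.Chars.join [] ps = ps.flatten := by
  induction ps with
  | nil => simp [PySem.Chars.join, List.intercalate]
  | cons a t ih =>
    cases t with
    | nil => simp [PySem.Chars.join, List.intercalate]
    | cons b u =>
      rw [PySem.Chars.join_cons_cons]
      simp only [List.flatten_cons]
      rw [ih]
      simp

-- xs[0::2] of a tail, unfolded one step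
theorem strideEvens_cons (y : Int) (r : List Int) :
    strideEvens (y :: r) = y :: strideEvens r.tail := by
  cases r <;> rfl

-- B's interleaved pieces and A's pair-wise pieces concatenate to the same characters
theorem pieces_flatten_eq (numbers : List Int) :
    (((((strideEvens numbers).map PySem.Int.toStr).zip
        (((strideEvens numbers.tail).map (fun o => PySem.Dict.getD (PySem.Dict.ofList [(0, "+,"), (1, "-,")] : PySem.Dict Int String) o "")) ++
          List.replicate (((strideEvens numbers).map PySem.Int.toStr).length -
            ((strideEvens numbers.tail).map (fun o => PySem.Dict.getD (PySem.Dict.ofList [(0, "+,"), (1, "-,")] : PySem.Dict Int String) o "")).length) "")).flatMap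
        (fun p => [p.1, p.2])).map String.toList).flatten
    = ((altGo numbers).map String.toList).flatten := by
  induction numbers using altGo.induct with
  | case1 => simp [strideEvens, altGo]
  | case2 n => simp [strideEvens, altGo]
  | case3 n o rest ih =>
      have hsign : (PySem.Dict.getD (PySem.Dict.ofList [(0, "+,"), (1, "-,")] : PySem.Dict Int String) o "").toList
          = ((if o = 0 then ["+,"] else if o = 1 then ["-,"] else []).map String.toList).flatten := by
        have hd : (PySem.Dict.ofList [(0, "+,"), (1, "-,")] : PySem.Dict Int String)
            = PySem.Dict.mk [(0, "+,"), (1, "-,")] := by decide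
        by_cases h0 : o = 0
        · subst h0; decide
        · by_cases h1 : o = 1
          · subst h1; decide
          · rw [PySem.Dict.getD, hd]
            simp [PySem.Dict.get?, h0, h1, Ne.symm]
      simp only [strideEvens, List.tail_cons, strideEvens_cons, List.map_cons,
        List.length_cons, Nat.succ_sub_succ, List.cons_append, List.zip_cons_cons,
        List.flatMap_cons, List.flatten_cons, altGo]
      simp only [List.map_append, List.flatten_append, List.append_assoc] at ih ⊢
      rw [ih, hsign]
      simp

-- ===== VERDICT (by name: the statement is the Claim_ definition above) =====
theorem number_list_to_path_seq_spec : Claim_equal_number_list_to_path_seq := by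
  intro numbers _
  unfold Spec_number_list_to_path_seq number_list_to_path_seq number_list_to_path_seq_alt
  rw [loopA_eq_altGo numbers 0 [] (by decide)]
  simp only [List.nil_append]
  congr 1
  apply String.toList_injective
  rw [PySem.Str.toList_join, PySem.Str.toList_join]
  simp only [String.toList_empty]
  rw [join_nil_eq_flatten, join_nil_eq_flatten]
  exact (pieces_flatten_eq numbers).symm
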